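-- pv_equiv track=rewrite | github.com/cloud-computing-group-2/abarrotes-backend | lambda/cart/UpdateProduct.py | consolidar_productos
-- ===== SOURCE A (Python) =====
-- def consolidar_productos(productos):
--     productos_dict = {}
--     for p in productos:
--         pid = p['product_id']
--         if pid in productos_dict:
--             productos_dict[pid]['amount'] += p['amount']
--             productos_dict[pid]['price'] += p['price']
--         else:
--             productos_dict[pid] = dict(p)
--     return list(productos_dict.values())
-- ===== SOURCE B (Python) =====
-- def consolidar_productos(productos):
--     grupos = {}
--     for p in productos:
--         grupos.setdefault(p['product_id'], []).append(p)
--     resultado = []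
--     for grupo in grupos.values():
--         consolidado = dict(grupo[0])
--         for p in grupo[1:]:
--             consolidado['amount'] += p['amount']
--             consolidado['price'] += p['price']
--         resultado.append(consolidado)
--     return resultado
-- ===== Notes on version B (the rewrite author's own statement) =====
-- stated objective: alternative
-- what changed: B first groups the products by product_id into lists in one pass, then consolidates each group in a second pass (copy of the first product plus summed amount/price of the rest), instead of A's single pass that accumulates amount/price directly into the result dict.
import Mathlib
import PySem

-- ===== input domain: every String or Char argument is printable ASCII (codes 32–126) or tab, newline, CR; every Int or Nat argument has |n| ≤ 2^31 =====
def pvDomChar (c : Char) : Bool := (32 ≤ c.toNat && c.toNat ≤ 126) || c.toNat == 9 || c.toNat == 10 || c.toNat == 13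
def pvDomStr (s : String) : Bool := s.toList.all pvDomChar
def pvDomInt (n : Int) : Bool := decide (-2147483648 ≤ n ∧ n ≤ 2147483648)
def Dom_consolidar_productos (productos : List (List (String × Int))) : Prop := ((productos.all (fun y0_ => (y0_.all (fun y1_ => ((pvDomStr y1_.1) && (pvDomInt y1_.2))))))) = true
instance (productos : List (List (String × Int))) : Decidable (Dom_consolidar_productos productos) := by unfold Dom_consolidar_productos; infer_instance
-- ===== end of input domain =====

-- B consolidates by first grouping the products by product_id and then summing each group
-- in a second pass, instead of A's single pass that accumulates into the result dict (objective: alternative).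


-- ===== PORT A =====
-- each Python product dict is represented by its association list; pvDictOf is the dict view
def pvDictOf (p : List (String × Int)) : PySem.Dict String Int := PySem.Dict.ofList p

-- one iteration of A's loop; p['k'] is ported as getD with default 0, exact under Pre_
-- (Pre_ guarantees the keys are present; Python raises KeyError otherwise).
-- 'productos_dict[pid]['amount'] += …' mutates the stored inner dict: ported as Dict.modify.
def pvStepA (d : PySem.Dict Int (PySem.Dict String Int)) (p : List (String × Int)) :
    PySem.Dict Int (PySem.Dict String Int) :=
  let pd := pvDictOf p
  let pid := pd.getD "product_id" 0
  if d.contains pid then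
    let d1 := d.modify pid PySem.Dict.empty
      (fun q => q.insert "amount" (q.getD "amount" 0 + pd.getD "amount" 0))
    d1.modify pid PySem.Dict.empty
      (fun q => q.insert "price" (q.getD "price" 0 + pd.getD "price" 0))
  else
    d.insert pid pd

def consolidar_productos (productos : List (List (String × Int))) : List (List (String × Int)) :=
  ((productos.foldl pvStepA PySem.Dict.empty).values).map (fun q => q.items)

-- ===== PORT B =====
-- grupos.setdefault(pid, []).append(p): append p to pid's group, creating it if absent
def pvStepB (g : PySem.Dict Int (List (PySem.Dict String Int))) (p : List (String × Int)) :
    PySem.Dict Int (List (PySem.Dict String Int)) :=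
  let pd := pvDictOf p
  g.modify (pd.getD "product_id" 0) [] (fun gr => gr ++ [pd])

-- consolidado['amount'] += p['amount']; consolidado['price'] += p['price']
def pvAdd (acc : PySem.Dict String Int) (pd : PySem.Dict String Int) : PySem.Dict String Int :=
  let acc1 := acc.insert "amount" (acc.getD "amount" 0 + pd.getD "amount" 0)
  acc1.insert "price" (acc1.getD "price" 0 + pd.getD "price" 0)

-- consolidado = dict(grupo[0]); then fold pvAdd over grupo[1:]
def pvConsolidate (grupo : List (PySem.Dict String Int)) : PySem.Dict String Int :=
  match grupo with
  | [] => PySem.Dict.empty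
  | q :: rest => rest.foldl pvAdd q

def consolidar_productos_alt (productos : List (List (String × Int))) : List (List (String × Int)) :=
  let grupos := productos.foldl pvStepB PySem.Dict.empty
  ((grupos.values).map pvConsolidate).map (fun q => q.items)

-- ===== PRECONDITION & SPEC =====
-- the product_id of a product dict (duplicate keys in the association list: last one wins, as in dict(p))
def pvPid (p : List (String × Int)) : Int :=
  ((p.reverse.find? (fun kv => kv.1 == "product_id")).map Prod.snd).getD 0

-- Pre_ excludes exactly the inputs where the Python A raises KeyError: some product lacks the
-- key 'product_id', or a product whose product_id occurs more than once lacks 'amount' or 'price'.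
def Pre_consolidar_productos (productos : List (List (String × Int))) : Prop :=
  ∀ p ∈ productos, "product_id" ∈ p.map Prod.fst ∧
    (1 < productos.countP (fun q => pvPid q == pvPid p) →
      "amount" ∈ p.map Prod.fst ∧ "price" ∈ p.map Prod.fst)
instance (productos : List (List (String × Int))) : Decidable (Pre_consolidar_productos productos) := by
  unfold Pre_consolidar_productos; infer_instance

def pvWitness_consolidar_productos : (List (List (String × Int))) :=
  [[("product_id", 1), ("amount", 2), ("price", 3)], [("product_id", 1), ("amount", 1), ("price", 5)]]

def Spec_consolidar_productos (productos : List (List (String × Int))) (out : List (List (String × Int))) : Prop := out = consolidar_productos_alt productos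
instance (productos : List (List (String × Int))) (out : List (List (String × Int))) : Decidable (Spec_consolidar_productos productos out) := by unfold Spec_consolidar_productos; infer_instance

-- ===== CLAIM (what is proved, stated in full; the proofs are below) =====
def Claim_equal_consolidar_productos : Prop := ∀ (productos : List (List (String × Int))), Dom_consolidar_productos productos → Pre_consolidar_productos productos → Spec_consolidar_productos productos (consolidar_productos productos)

-- ===== LEMMAS AND PROOFS =====

-- the value relation between A's accumulator entries and B's groups
def pvF (kg : Int × List (PySem.Dict String Int)) : Int × PySem.Dict String Int :=
  (kg.1, pvConsolidate kg.2)

theorem pvConsolidate_append (g : List (PySem.Dict String Int)) (hg : g ≠ [])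
    (pd : PySem.Dict String Int) :
    pvConsolidate (g ++ [pd]) = pvAdd (pvConsolidate g) pd := by
  match g, hg with
  | q :: rest, _ => simp [pvConsolidate, List.foldl_append]

theorem pv_step (dA : PySem.Dict Int (PySem.Dict String Int))
    (dB : PySem.Dict Int (List (PySem.Dict String Int)))
    (h : dA.items = dB.items.map pvF)
    (hne : ∀ kg ∈ dB.items, kg.2 ≠ []) (p : List (String × Int)) :
    (pvStepA dA p).items = (pvStepB dB p).items.map pvF ∧
      ∀ kg ∈ (pvStepB dB p).items, kg.2 ≠ [] := by
  obtain ⟨pd, hpd⟩ : ∃ pd, pvDictOf p = pd := ⟨_, rfl⟩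
  obtain ⟨pid, hpid⟩ : ∃ pid, pd.getD "product_id" 0 = pid := ⟨_, rfl⟩
  simp only [pvStepA, pvStepB, hpd, hpid]
  have hcont : dA.contains pid = dB.contains pid := by
    simp [PySem.Dict.contains, h, List.any_map, Function.comp_def, pvF]
  by_cases hc : dB.contains pid = true
  · -- pid already grouped
    have hcA : dA.contains pid = true := hcont.trans hc
    have hg' : (dB.get? pid).isSome := by rw [← PySem.Dict.contains_eq_isSome_get?, hc]
    obtain ⟨g, hg⟩ := Option.isSome_iff_exists.mp hg'
    -- the found pair is one of the items, so its group g is nonempty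
    have hgne : g ≠ [] := by
      have h2 := hg
      simp only [PySem.Dict.get?, Option.map_eq_some_iff] at h2
      obtain ⟨pr, hfind, hsnd⟩ := h2
      have hmem := List.mem_of_find?_eq_some hfind
      have := hne pr hmem
      rwa [hsnd] at this
    have hgetA : dA.get? pid = some (pvConsolidate g) := by
      simp only [PySem.Dict.get?, h, List.find?_map]
      have hpred : (fun q : Int × PySem.Dict String Int => q.1 == pid) ∘ pvF
          = (fun kg : Int × List (PySem.Dict String Int) => kg.1 == pid) := by
        funext kg; simp [pvF]
      rw [hpred, Option.map_map]
      simp only [PySem.Dict.get?, Option.map_eq_some_iff] at hg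
      obtain ⟨pr, hfind, hsnd⟩ := hg
      simp [hfind, pvF, Function.comp_def, hsnd]
    have hgetDA : dA.getD pid PySem.Dict.empty = pvConsolidate g := by
      simp [PySem.Dict.getD, hgetA]
    have hgetDB : dB.getD pid [] = g := by simp [PySem.Dict.getD, hg]
    simp only [hcA, if_true, PySem.Dict.modify, hgetDA, hgetDB,
      PySem.Dict.getD_insert_self, PySem.Dict.insert_insert_self]
    rw [PySem.Dict.items_insert_of_contains _ _ hcA,
      PySem.Dict.items_insert_of_contains _ _ hc]
    constructor
    · rw [h, List.map_map, List.map_map]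
      apply List.map_congr_left
      intro kg _
      by_cases hk : kg.1 = pid
      · simp [pvF, hk, pvConsolidate_append g hgne, pvAdd]
      · simp [pvF, hk]
    · intro kg hkg
      simp only [List.mem_map] at hkg
      obtain ⟨kg', hkg', hrepl⟩ := hkg
      by_cases hk : kg'.1 = pid
      · simp only [hk, beq_self_eq_true, if_true] at hrepl
        simp [← hrepl]
      · simp only [beq_iff_eq, hk, if_false] at hrepl
        exact hrepl ▸ hne kg' hkg'
  · -- new pid: both sides append a fresh entry
    have hc' : dB.contains pid = false := by simpa using hc
    have hcA : dA.contains pid = false := hcont.trans hc'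
    have hnone : dB.get? pid = none := by
      have h3 := PySem.Dict.contains_eq_isSome_get? dB pid
      rw [hc'] at h3
      exact Option.not_isSome_iff_eq_none.mp (by simp [← h3])
    have hgetDB : dB.getD pid [] = [] := by simp [PySem.Dict.getD, hnone]
    simp only [hcA, Bool.false_eq_true, if_false, PySem.Dict.modify, hgetDB]
    rw [PySem.Dict.items_insert_of_not_contains _ _ hcA,
      PySem.Dict.items_insert_of_not_contains _ _ hc']
    constructor
    · simp [h, pvF, pvConsolidate]
    · intro kg hkg
      rcases List.mem_append.mp hkg with hm | hm
      · exact hne kg hm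
      · simp only [List.mem_singleton] at hm
        simp [hm]

theorem pv_inv (productos : List (List (String × Int)))
    (dA : PySem.Dict Int (PySem.Dict String Int))
    (dB : PySem.Dict Int (List (PySem.Dict String Int)))
    (h : dA.items = dB.items.map pvF)
    (hne : ∀ kg ∈ dB.items, kg.2 ≠ []) :
    (productos.foldl pvStepA dA).items = (productos.foldl pvStepB dB).items.map pvF := by
  induction productos generalizing dA dB with
  | nil => simpa using h
  | cons p rest ih =>
    obtain ⟨h1, h2⟩ := pv_step dA dB h hne p
    exact ih _ _ h1 h2

-- ===== VERDICT (by name: the statement is the Claim_ definition above) =====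
theorem consolidar_productos_spec : Claim_equal_consolidar_productos := by
  intro productos _ _
  unfold Spec_consolidar_productos consolidar_productos consolidar_productos_alt
  have h := pv_inv productos PySem.Dict.empty PySem.Dict.empty (by rfl) (by simp [PySem.Dict.empty])
  simp only [PySem.Dict.values, h, List.map_map]
  rfl
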